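-- pv_equiv track=rewrite | github.com/edromediaTech/EBJFL-Broadcast | scripts/import_songs.py | _parse_bracket_lyrics
-- ===== SOURCE A (Python) =====
-- def _parse_bracket_lyrics(text: str) -> list[dict]:
--     """Parse des paroles avec marqueurs [Couplet 1], [Refrain], etc."""
--     verses = []
--     current_label = ""
--     current_type = "verse"
--     current_lines = []
--
--     for line in text.split("\n"):
--         stripped = line.strip()
--         if stripped.startswith("[") and "]" in stripped:
--             if current_lines:
--                 verses.append({"type": current_type, "label": current_label,
--                                "text": "\n".join(current_lines)})
--                 current_lines = []
--             current_label = stripped.strip("[]")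
--             lbl_lower = current_label.lower()
--             if "refrain" in lbl_lower or "chorus" in lbl_lower:
--                 current_type = "chorus"
--             elif "pont" in lbl_lower or "bridge" in lbl_lower:
--                 current_type = "bridge"
--             else:
--                 current_type = "verse"
--         elif stripped:
--             current_lines.append(stripped)
--
--     if current_lines:
--         verses.append({"type": current_type, "label": current_label,
--                        "text": "\n".join(current_lines)})
--
--     return verses
-- ===== SOURCE B (Python) =====
-- def _parse_bracket_lyrics(text: str) -> list[dict]:
--     """Parse des paroles avec marqueurs [Couplet 1], [Refrain], etc."""
--
--     def classify(label):
--         low = label.lower()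
--         if "refrain" in low or "chorus" in low:
--             return "chorus"
--         if "pont" in low or "bridge" in low:
--             return "bridge"
--         return "verse"
--
--     def sections(label, rest):
--         i = 0
--         while i < len(rest) and not (rest[i].startswith("[") and "]" in rest[i]):
--             i += 1
--         body = [s for s in rest[:i] if s]
--         out = []
--         if body:
--             out.append({"type": classify(label), "label": label,
--                         "text": "\n".join(body)})
--         if i < len(rest):
--             out.extend(sections(rest[i].strip("[]"), rest[i + 1:]))
--         return out
--
--     return sections("", [line.strip() for line in text.split("\n")])
-- ===== Notes on version B (the rewrite author's own statement) =====
-- stated objective: alternative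
-- what changed: Replaces A's single stateful accumulator loop (current_label/current_type/current_lines with duplicated flush logic) by a recursive decomposition that splits the line list at the next header line (takeWhile/dropWhile), emits the section body before it and recurses on the rest with the new label.
import Mathlib
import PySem

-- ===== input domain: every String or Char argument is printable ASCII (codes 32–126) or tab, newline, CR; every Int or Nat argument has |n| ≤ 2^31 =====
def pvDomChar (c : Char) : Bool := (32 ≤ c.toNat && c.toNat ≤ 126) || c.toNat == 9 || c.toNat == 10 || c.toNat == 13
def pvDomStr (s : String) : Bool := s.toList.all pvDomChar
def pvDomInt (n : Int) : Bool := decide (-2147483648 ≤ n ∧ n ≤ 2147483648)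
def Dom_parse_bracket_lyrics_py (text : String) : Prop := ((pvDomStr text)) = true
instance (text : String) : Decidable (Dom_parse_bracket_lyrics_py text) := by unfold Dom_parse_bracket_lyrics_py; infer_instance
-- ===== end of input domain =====

-- B replaces A's stateful accumulator loop by a recursive split-at-next-header decomposition (alternative structure, same cost).

-- ===== PORT A =====
-- the "append current section if non-empty" code A writes twice (in the loop and at the end)
def pvFlush (verses : List (List (String × String))) (label typ : String)
    (lines : List String) : List (List (String × String)) :=
  if lines = [] then verses
  else verses ++ [[("type", typ), ("label", label), ("text", PySem.Str.join "\n" lines)]]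

-- the body of A's for-loop, state = (verses, current_label, current_type, current_lines)
def pvStepA (st : List (List (String × String)) × String × String × List String)
    (line : String) : List (List (String × String)) × String × String × List String :=
  let stripped := PySem.Str.strip line
  if PySem.Str.startswith stripped "[" && PySem.Str.isIn "]" stripped then
    let verses' := pvFlush st.1 st.2.1 st.2.2.1 st.2.2.2
    let label := PySem.Str.stripChars stripped "[]"
    let low := PySem.Str.lower label
    let typ :=
      if PySem.Str.isIn "refrain" low || PySem.Str.isIn "chorus" low then "chorus"
      else if PySem.Str.isIn "pont" low || PySem.Str.isIn "bridge" low then "bridge"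
      else "verse"
    (verses', label, typ, [])
  else if stripped ≠ "" then (st.1, st.2.1, st.2.2.1, st.2.2.2 ++ [stripped])
  else st

def parse_bracket_lyrics_py (text : String) : List (List (String × String)) :=
  let st := ((PySem.Chars.splitOn text.toList "\n".toList).map String.ofList).foldl pvStepA ([], "", "verse", [])
  pvFlush st.1 st.2.1 st.2.2.1 st.2.2.2

-- ===== PORT B =====
def pvIsHdr (s : String) : Bool :=
  PySem.Str.startswith s "[" && PySem.Str.isIn "]" s

def pvClassify (label : String) : String :=
  let low := PySem.Str.lower label
  if PySem.Str.isIn "refrain" low || PySem.Str.isIn "chorus" low then "chorus"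
  else if PySem.Str.isIn "pont" low || PySem.Str.isIn "bridge" low then "bridge"
  else "verse"

-- Source B's `sections`: scan to the first header line (the while loop = takeWhile/dropWhile split),
-- emit the body before it, recurse on the lines after it
def pvSections (label : String) (rest : List String) : List (List (String × String)) :=
  let body := (rest.takeWhile (fun s => !pvIsHdr s)).filter (fun s => s != "")
  let out : List (List (String × String)) :=
    if body = [] then []
    else [[("type", pvClassify label), ("label", label), ("text", PySem.Str.join "\n" body)]]
  match hE : rest.dropWhile (fun s => !pvIsHdr s) with
  | [] => out
  | h :: t => out ++ pvSections (PySem.Str.stripChars h "[]") t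
termination_by rest.length
decreasing_by
  have h1 := List.length_dropWhile_le (p := fun s => !pvIsHdr s) (l := rest)
  rw [hE] at h1
  simp at h1
  omega

def parse_bracket_lyrics_py_alt (text : String) : List (List (String × String)) :=
  pvSections "" (((PySem.Chars.splitOn text.toList "\n".toList).map String.ofList).map (fun line => PySem.Str.strip line))

-- ===== PRECONDITION & SPEC =====
def Spec_parse_bracket_lyrics_py (text : String) (out : List (List (String × String))) : Prop := out = parse_bracket_lyrics_py_alt text
instance (text : String) (out : List (List (String × String))) : Decidable (Spec_parse_bracket_lyrics_py text out) := by unfold Spec_parse_bracket_lyrics_py; infer_instance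

-- ===== CLAIM (what is proved, stated in full; the proofs are below) =====
def Claim_equal_parse_bracket_lyrics_py : Prop := ∀ (text : String), Dom_parse_bracket_lyrics_py text → Spec_parse_bracket_lyrics_py text (parse_bracket_lyrics_py text)

-- ===== LEMMAS AND PROOFS =====

-- emit one section (empty body ↦ nothing)
def pvEmit (label : String) (body : List String) : List (List (String × String)) :=
  if body = [] then []
  else [[("type", pvClassify label), ("label", label), ("text", PySem.Str.join "\n" body)]]

-- B's recursion generalized with the pending body `cur` (matches A's loop state)
def pvSecGen (label : String) (cur : List String) : List String → List (List (String × String))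
  | [] => pvEmit label cur
  | s :: t =>
    if pvIsHdr s then pvEmit label cur ++ pvSecGen (PySem.Str.stripChars s "[]") [] t
    else pvSecGen label (cur ++ (if s = "" then [] else [s])) t

lemma pvSections_unfold (label : String) (rest : List String) :
    pvSections label rest =
      pvEmit label ((rest.takeWhile (fun s => !pvIsHdr s)).filter (fun s => s != "")) ++
        (match rest.dropWhile (fun s => !pvIsHdr s) with
          | [] => []
          | h :: t => pvSections (PySem.Str.stripChars h "[]") t) := by
  rw [pvSections]
  split <;> rename_i heq <;> rw [heq] <;> simp [pvEmit]

lemma pvSecGen_eq (rest : List String) : ∀ (label : String) (cur : List String),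
    pvSecGen label cur rest =
      pvEmit label (cur ++ (rest.takeWhile (fun s => !pvIsHdr s)).filter (fun s => s != "")) ++
        (match rest.dropWhile (fun s => !pvIsHdr s) with
          | [] => []
          | h :: t => pvSections (PySem.Str.stripChars h "[]") t) := by
  induction rest with
  | nil => intro label cur; simp [pvSecGen]
  | cons s t ih =>
    intro label cur
    by_cases hH : pvIsHdr s
    · simp [pvSecGen, hH]
      rw [ih]
      rw [pvSections_unfold]
      simp [pvEmit]
    · simp [pvSecGen, hH]
      rw [ih]
      by_cases hE : s = ""
      · simp [hE]
      · simp [hE, List.append_assoc]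

lemma pvSections_eq_gen (label : String) (rest : List String) :
    pvSections label rest = pvSecGen label [] rest := by
  rw [pvSecGen_eq, pvSections_unfold]
  simp

lemma pvFlush_eq (v : List (List (String × String))) (l : String) (c : List String) :
    pvFlush v l (pvClassify l) c = v ++ pvEmit l c := by
  unfold pvFlush pvEmit
  split_ifs <;> simp

lemma foldA_eq (ls : List String) : ∀ (verses : List (List (String × String)))
    (label : String) (cur : List String),
    (let st := ls.foldl pvStepA (verses, label, pvClassify label, cur);
      pvFlush st.1 st.2.1 st.2.2.1 st.2.2.2)
      = verses ++ pvSecGen label cur (ls.map PySem.Str.strip) := by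
  induction ls with
  | nil =>
    intro verses label cur
    simp [pvSecGen, pvFlush_eq]
  | cons l ls ih =>
    intro verses label cur
    simp only [List.foldl_cons, List.map_cons]
    by_cases hH : pvIsHdr (PySem.Str.strip l)
    · have hstep : pvStepA (verses, label, pvClassify label, cur) l =
          (pvFlush verses label (pvClassify label) cur,
            PySem.Str.stripChars (PySem.Str.strip l) "[]",
            pvClassify (PySem.Str.stripChars (PySem.Str.strip l) "[]"), ([] : List String)) := by
        simp only [pvIsHdr] at hH
        simp only [pvStepA, pvClassify]
        rw [if_pos hH]
      rw [hstep, ih]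
      simp [pvSecGen, hH, pvFlush_eq, List.append_assoc]
    · rw [Bool.not_eq_true] at hH
      by_cases hE : PySem.Str.strip l = ""
      · have hstep : pvStepA (verses, label, pvClassify label, cur) l =
            (verses, label, pvClassify label, cur) := by
          simp only [pvIsHdr] at hH
          simp only [pvStepA]
          rw [if_neg (by rw [hH]; exact Bool.false_ne_true), if_neg (by simp [hE])]
        rw [hE] at hH
        rw [hstep, ih]
        simp [pvSecGen, hH, hE]
      · have hstep : pvStepA (verses, label, pvClassify label, cur) l =
            (verses, label, pvClassify label, cur ++ [PySem.Str.strip l]) := by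
          simp only [pvIsHdr] at hH
          simp only [pvStepA]
          rw [if_neg (by rw [hH]; exact Bool.false_ne_true), if_pos hE]
        rw [hstep, ih]
        simp [pvSecGen, hH, hE]

-- ===== VERDICT (by name: the statement is the Claim_ definition above) =====
theorem parse_bracket_lyrics_py_spec : Claim_equal_parse_bracket_lyrics_py := by
  intro text _
  show parse_bracket_lyrics_py text = parse_bracket_lyrics_py_alt text
  unfold parse_bracket_lyrics_py parse_bracket_lyrics_py_alt
  have h0 : ("verse" : String) = pvClassify "" := by decide
  rw [h0, foldA_eq, pvSections_eq_gen]
  simp
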